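-- pv_equiv track=rewrite | github.com/beomjookim/everyday-algorithm | graph/[PCCP 모의고사 #2] 1번 - 실습용 로봇.py | solution
-- ===== SOURCE A (Python) =====
-- def solution(command):
--     x, y = 0, 0
--     dir_x, dir_y = 0, 1
--
--     for com in command:
--         if com == 'G': x, y = x+dir_x, y+dir_y
--         elif com == 'B': x, y = x-dir_x, y-dir_y
--         elif com == 'R': dir_x, dir_y = dir_y, -dir_x
--         else: dir_x, dir_y = -dir_y, dir_x
--
--     return [x, y]
-- ===== SOURCE B (Python) =====
-- def solution(command):
--     # Phase 1: single pass tracking only the heading (0=N,1=E,2=S,3=W)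
--     # and net signed step counts per heading.
--     heading = 0
--     net = [0, 0, 0, 0]
--     for com in command:
--         if com == 'G': net[heading] += 1
--         elif com == 'B': net[heading] -= 1
--         elif com == 'R': heading = (heading + 1) % 4
--         else: heading = (heading + 3) % 4
--     # Phase 2: combine the buckets with the cardinal vectors.
--     vec = [(0, 1), (1, 0), (0, -1), (-1, 0)]
--     x = sum(n * vx for n, (vx, vy) in zip(net, vec))
--     y = sum(n * vy for n, (vx, vy) in zip(net, vec))
--     return [x, y]
-- ===== Notes on version B (the rewrite author's own statement) =====
-- stated objective: alternative
-- what changed: Instead of updating the position and the rotating direction vector inline, B keeps an integer heading 0..3 and accumulates net signed steps per heading in one pass, then combines the four buckets with the cardinal vectors in a separate phase.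
import Mathlib
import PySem

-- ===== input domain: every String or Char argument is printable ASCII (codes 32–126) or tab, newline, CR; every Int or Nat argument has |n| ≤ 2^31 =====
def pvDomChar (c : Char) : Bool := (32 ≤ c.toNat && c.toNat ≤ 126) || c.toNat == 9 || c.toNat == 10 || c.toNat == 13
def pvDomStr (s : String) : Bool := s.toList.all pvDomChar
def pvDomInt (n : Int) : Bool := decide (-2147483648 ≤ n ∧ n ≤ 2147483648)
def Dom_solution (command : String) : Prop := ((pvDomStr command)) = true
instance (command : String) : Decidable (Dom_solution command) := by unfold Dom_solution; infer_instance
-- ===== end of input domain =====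

-- B replaces inline position/direction-vector updates with a heading-index pass
-- plus a separate bucket-combining phase (objective: alternative decomposition).


-- ===== PORT A =====
def solutionLoop (s : List Char) (x y dx dy : Int) : List Int :=
  match s with
  | [] => [x, y]
  | c :: rest =>
    if c = 'G' then solutionLoop rest (x + dx) (y + dy) dx dy
    else if c = 'B' then solutionLoop rest (x - dx) (y - dy) dx dy
    else if c = 'R' then solutionLoop rest x y dy (-dx)
    else solutionLoop rest x y (-dy) dx

def solution (command : String) : List Int :=
  solutionLoop command.toList 0 0 0 1

-- ===== PORT B =====
def solutionAltLoop (s : List Char) (heading : Nat) (net : List Int) : Nat × List Int :=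
  match s with
  | [] => (heading, net)
  | c :: rest =>
    if c = 'G' then solutionAltLoop rest heading (net.set heading (net.getD heading 0 + 1))
    else if c = 'B' then solutionAltLoop rest heading (net.set heading (net.getD heading 0 - 1))
    else if c = 'R' then solutionAltLoop rest ((heading + 1) % 4) net
    else solutionAltLoop rest ((heading + 3) % 4) net

def solutionAltCombine (net : List Int) : List Int :=
  let vec : List (Int × Int) := [(0, 1), (1, 0), (0, -1), (-1, 0)]
  let x := (net.zip vec).foldl (fun a p => a + p.1 * p.2.1) 0
  let y := (net.zip vec).foldl (fun a p => a + p.1 * p.2.2) 0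
  [x, y]

def solution_alt (command : String) : List Int :=
  solutionAltCombine (solutionAltLoop command.toList 0 [0, 0, 0, 0]).2

-- ===== PRECONDITION & SPEC =====
def Spec_solution (command : String) (out : List Int) : Prop := out = solution_alt command
instance (command : String) (out : List Int) : Decidable (Spec_solution command out) := by unfold Spec_solution; infer_instance

-- ===== CLAIM (what is proved, stated in full; the proofs are below) =====
def Claim_equal_solution : Prop := ∀ (command : String), Dom_solution command → Spec_solution command (solution command)

-- ===== LEMMAS AND PROOFS =====
def pvVecX : Nat → Int
  | 0 => 0 | 1 => 1 | 2 => 0 | _ => -1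

def pvVecY : Nat → Int
  | 0 => 1 | 1 => 0 | 2 => -1 | _ => 0

theorem solutionLoop_eq (s : List Char) :
    ∀ (h : Nat), h < 4 → ∀ (n0 n1 n2 n3 : Int),
      solutionLoop s (n1 - n3) (n0 - n2) (pvVecX h) (pvVecY h)
        = solutionAltCombine (solutionAltLoop s h [n0, n1, n2, n3]).2 := by
  induction s with
  | nil =>
    intro h hh n0 n1 n2 n3
    simp [solutionLoop, solutionAltLoop, solutionAltCombine]
    omega
  | cons c rest ih =>
    intro h hh n0 n1 n2 n3
    simp only [solutionLoop, solutionAltLoop]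
    split_ifs with hG hB hR
    · interval_cases h <;>
        simp only [pvVecX, pvVecY, List.set, List.getD, List.getElem?_cons_zero,
          List.getElem?_cons_succ, Option.getD_some] <;>
        [ (have := ih 0 (by norm_num) (n0 + 1) n1 n2 n3);
          (have := ih 1 (by norm_num) n0 (n1 + 1) n2 n3);
          (have := ih 2 (by norm_num) n0 n1 (n2 + 1) n3);
          (have := ih 3 (by norm_num) n0 n1 n2 (n3 + 1)) ] <;>
        simp only [pvVecX, pvVecY] at this <;>
        (rw [← this]; all_goals ring_nf)
    · interval_cases h <;>
        simp only [pvVecX, pvVecY, List.set, List.getD, List.getElem?_cons_zero,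
          List.getElem?_cons_succ, Option.getD_some] <;>
        [ (have := ih 0 (by norm_num) (n0 - 1) n1 n2 n3);
          (have := ih 1 (by norm_num) n0 (n1 - 1) n2 n3);
          (have := ih 2 (by norm_num) n0 n1 (n2 - 1) n3);
          (have := ih 3 (by norm_num) n0 n1 n2 (n3 - 1)) ] <;>
        simp only [pvVecX, pvVecY] at this <;>
        (rw [← this]; all_goals ring_nf)
    · interval_cases h <;>
        [ (have := ih 1 (by norm_num) n0 n1 n2 n3);
          (have := ih 2 (by norm_num) n0 n1 n2 n3);
          (have := ih 3 (by norm_num) n0 n1 n2 n3);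
          (have := ih 0 (by norm_num) n0 n1 n2 n3) ] <;>
        simp only [pvVecX, pvVecY] at this ⊢ <;>
        (rw [← this]; all_goals norm_num)
    · interval_cases h <;>
        [ (have := ih 3 (by norm_num) n0 n1 n2 n3);
          (have := ih 0 (by norm_num) n0 n1 n2 n3);
          (have := ih 1 (by norm_num) n0 n1 n2 n3);
          (have := ih 2 (by norm_num) n0 n1 n2 n3) ] <;>
        simp only [pvVecX, pvVecY] at this ⊢ <;>
        (rw [← this]; all_goals norm_num)

-- ===== VERDICT (by name: the statement is the Claim_ definition above) =====
theorem solution_spec : Claim_equal_solution := by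
  intro command _
  unfold Spec_solution solution solution_alt
  have := solutionLoop_eq command.toList 0 (by norm_num) 0 0 0 0
  simpa [pvVecX, pvVecY] using this
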